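-- pv_equiv track=rewrite | github.com/bc36/leetcode | Python/lc1500_1599.py | minOperationsMaxProfit
-- ===== SOURCE A (Python) =====
-- from typing import List, Optional, Tuple
--
-- def minOperationsMaxProfit(
--     customers: List[int], boardingCost: int, runningCost: int
-- ) -> int:
--     ans = -1
--     profit = mx = wait = i = rotation = 0
--     while i < len(customers) or wait:
--         if i < len(customers):
--             wait += customers[i]
--             i += 1
--         onboard = 4 if wait >= 4 else wait
--         wait -= onboard
--         profit += onboard * boardingCost - runningCost
--         rotation += 1
--         if profit > mx:
--             mx = profit
--             ans = rotation
--     return ans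
-- ===== SOURCE B (Python) =====
-- def minOperationsMaxProfit(customers, boardingCost, runningCost):
--     # One pass over customers, then the draining phase in closed form (no W/4 loop).
--     ans = -1
--     profit = mx = wait = rotation = 0
--     for c in customers:
--         wait += c
--         onboard = wait if wait < 4 else 4
--         wait -= onboard
--         profit += onboard * boardingCost - runningCost
--         rotation += 1
--         if profit > mx:
--             mx = profit
--             ans = rotation
--     q, r = divmod(wait, 4)
--     per = 4 * boardingCost - runningCost
--     top = profit + q * per
--     if top > mx:
--         mx = top
--         ans = rotation + q
--     if r and top + r * boardingCost - runningCost > mx: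
--         ans = rotation + q + 1
--     return ans
-- ===== Notes on version B (the rewrite author's own statement) =====
-- stated objective: faster
-- what changed: B simulates only the n customer-arrival rotations with a fold, then replaces A's wait//4 draining rotations by closed-form arithmetic (quotient/remainder of the leftover queue and the constant per-rotation profit).
import Mathlib
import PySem

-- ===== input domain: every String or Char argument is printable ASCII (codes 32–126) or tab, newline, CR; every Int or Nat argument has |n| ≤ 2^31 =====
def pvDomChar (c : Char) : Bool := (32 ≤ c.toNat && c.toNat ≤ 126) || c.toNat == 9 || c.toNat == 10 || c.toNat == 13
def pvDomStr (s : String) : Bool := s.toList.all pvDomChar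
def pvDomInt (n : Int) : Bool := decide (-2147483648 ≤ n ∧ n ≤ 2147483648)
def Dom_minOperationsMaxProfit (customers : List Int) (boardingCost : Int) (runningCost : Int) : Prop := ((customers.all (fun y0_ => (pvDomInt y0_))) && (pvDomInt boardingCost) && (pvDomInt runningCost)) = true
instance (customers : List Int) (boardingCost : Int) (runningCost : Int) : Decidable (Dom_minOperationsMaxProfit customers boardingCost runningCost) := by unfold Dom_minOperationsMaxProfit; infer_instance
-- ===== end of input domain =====

-- B replaces A's per-4 draining loop by closed-form quotient/remainder arithmetic (return value only; no mutation involved).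

-- ===== PORT A =====
-- A's while loop, transcribed with a fuel guard that only makes it total:
-- each iteration consumes one fuel, and pvFuel is enough for every iteration
-- (proved in the lemmas below), so the 0-fuel branch is never reached.
def pvLoopA (cs : List Int) (bc rc ans profit mx wait rotation : Int) (i : Nat) : Nat → Int
  | 0 => ans
  | fuel + 1 =>
    if i < cs.length then
      let wait1 := wait + cs.getD i 0
      let onboard := if wait1 ≥ 4 then 4 else wait1
      let wait2 := wait1 - onboard
      let profit1 := profit + onboard * bc - rc
      let rotation1 := rotation + 1
      if profit1 > mx then pvLoopA cs bc rc rotation1 profit1 profit1 wait2 rotation1 (i + 1) fuel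
      else pvLoopA cs bc rc ans profit1 mx wait2 rotation1 (i + 1) fuel
    else if wait ≠ 0 then
      let onboard := if wait ≥ 4 then 4 else wait
      let wait2 := wait - onboard
      let profit1 := profit + onboard * bc - rc
      let rotation1 := rotation + 1
      if profit1 > mx then pvLoopA cs bc rc rotation1 profit1 profit1 wait2 rotation1 i fuel
      else pvLoopA cs bc rc ans profit1 mx wait2 rotation1 i fuel
    else ans

-- Upper bound on the passengers that can ever be queued: sum of positive entries.
def pvPosSum : List Int → Nat
  | [] => 0
  | c :: t => c.toNat + pvPosSum t

def minOperationsMaxProfit (customers : List Int) (boardingCost : Int) (runningCost : Int) : Int :=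
  pvLoopA customers boardingCost runningCost (-1) 0 0 0 0 0
    (customers.length + pvPosSum customers + 1)

-- ===== PORT B =====
def pvStepB (bc rc : Int) (s : Int × Int × Int × Int × Int) (c : Int) : Int × Int × Int × Int × Int :=
  let (ans, profit, mx, wait, rotation) := s
  let wait1 := wait + c
  let onboard := if wait1 < 4 then wait1 else 4
  let wait2 := wait1 - onboard
  let profit1 := profit + onboard * bc - rc
  let rotation1 := rotation + 1
  if profit1 > mx then (rotation1, profit1, profit1, wait2, rotation1)
  else (ans, profit1, mx, wait2, rotation1)

def pvFinishB (bc rc ans profit mx wait rotation : Int) : Int :=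
  let q := PySem.Int.floordiv wait 4
  let r := PySem.Int.mod wait 4
  let per := 4 * bc - rc
  let top := profit + q * per
  let mx1 := if top > mx then top else mx
  let ans1 := if top > mx then rotation + q else ans
  if r ≠ 0 ∧ top + r * bc - rc > mx1 then rotation + q + 1 else ans1

def minOperationsMaxProfit_alt (customers : List Int) (boardingCost : Int) (runningCost : Int) : Int :=
  let s := customers.foldl (pvStepB boardingCost runningCost) (-1, 0, 0, 0, 0)
  pvFinishB boardingCost runningCost s.1 s.2.1 s.2.2.1 s.2.2.2.1 s.2.2.2.2

-- ===== PRECONDITION & SPEC =====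
def Spec_minOperationsMaxProfit (customers : List Int) (boardingCost : Int) (runningCost : Int) (out : Int) : Prop := out = minOperationsMaxProfit_alt customers boardingCost runningCost
instance (customers : List Int) (boardingCost : Int) (runningCost : Int) (out : Int) : Decidable (Spec_minOperationsMaxProfit customers boardingCost runningCost out) := by unfold Spec_minOperationsMaxProfit; infer_instance

-- ===== CLAIM (what is proved, stated in full; the proofs are below) =====
def Claim_equal_minOperationsMaxProfit : Prop := ∀ (customers : List Int) (boardingCost : Int) (runningCost : Int), Dom_minOperationsMaxProfit customers boardingCost runningCost → Spec_minOperationsMaxProfit customers boardingCost runningCost (minOperationsMaxProfit customers boardingCost runningCost)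

-- ===== LEMMAS AND PROOFS =====

theorem pvFloordiv_step (w : Int) (_h4w : 4 ≤ w) :
    PySem.Int.floordiv w 4 = PySem.Int.floordiv (w - 4) 4 + 1 := by
  rw [PySem.Int.floordiv_eq_ediv_of_pos (by norm_num), PySem.Int.floordiv_eq_ediv_of_pos (by norm_num)]
  omega

theorem pvMod_step (w : Int) (_h4w : 4 ≤ w) :
    PySem.Int.mod w 4 = PySem.Int.mod (w - 4) 4 := by
  rw [PySem.Int.mod_eq_emod_of_pos (by norm_num), PySem.Int.mod_eq_emod_of_pos (by norm_num)]
  omega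

-- Peeling one full (4-passenger) rotation off the closed form.
theorem pvFinish_step (bc rc ans profit mx wait rotation : Int) (h4 : 4 ≤ wait) (hm : profit ≤ mx) :
    (if profit + 4 * bc - rc > mx then
       pvFinishB bc rc (rotation + 1) (profit + 4 * bc - rc) (profit + 4 * bc - rc) (wait - 4) (rotation + 1)
     else pvFinishB bc rc ans (profit + 4 * bc - rc) mx (wait - 4) (rotation + 1))
    = pvFinishB bc rc ans profit mx wait rotation := by
  simp only [pvFinishB]
  rw [pvFloordiv_step _ h4, pvMod_step _ h4]
  have hq0 : 0 ≤ PySem.Int.floordiv (wait - 4) 4 := by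
    rw [PySem.Int.floordiv_eq_ediv_of_pos (by norm_num)]; omega
  set q := PySem.Int.floordiv (wait - 4) 4 with hq
  set r := PySem.Int.mod (wait - 4) 4 with hr
  have key : profit + (q + 1) * (4 * bc - rc) = profit + 4 * bc - rc + q * (4 * bc - rc) := by ring
  rw [key]
  obtain ⟨T, hT⟩ : ∃ T, q * (4 * bc - rc) = T := ⟨_, rfl⟩
  rw [hT]
  by_cases hP : 0 < 4 * bc - rc
  · have hT0 : 0 ≤ T := hT ▸ mul_nonneg hq0 hP.le
    rcases eq_or_lt_of_le hT0 with hTz | hTpos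
    · have hqz : q = 0 := by
        rcases mul_eq_zero.mp (hT.trans hTz.symm) with h | h
        · exact h
        · omega
      rw [hqz] at *
      split_ifs <;> omega
    · split_ifs <;> omega
  · split_ifs <;> omega

-- The last, partial rotation of the closed form.
theorem pvFinish_small (bc rc ans profit mx wait rotation : Int) (h0 : 0 < wait) (h4 : wait < 4) (hm : profit ≤ mx) :
    (if profit + wait * bc - rc > mx then
       pvFinishB bc rc (rotation + 1) (profit + wait * bc - rc) (profit + wait * bc - rc) 0 (rotation + 1)
     else pvFinishB bc rc ans (profit + wait * bc - rc) mx 0 (rotation + 1))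
    = pvFinishB bc rc ans profit mx wait rotation := by
  simp only [pvFinishB]
  have hd : PySem.Int.floordiv wait 4 = 0 := by
    rw [PySem.Int.floordiv_eq_ediv_of_pos (by norm_num)]; omega
  have hm4 : PySem.Int.mod wait 4 = wait := by
    rw [PySem.Int.mod_eq_emod_of_pos (by norm_num)]; omega
  have hd0 : PySem.Int.floordiv 0 4 = 0 := by decide
  have hm0 : PySem.Int.mod 0 4 = 0 := by decide
  rw [hd, hm4, hd0, hm0]
  obtain ⟨W, hW⟩ : ∃ W, wait * bc = W := ⟨_, rfl⟩
  rw [hW]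
  simp only [zero_mul, add_zero]
  split_ifs <;> omega

-- pvFinishB at wait = 0 returns ans when profit ≤ mx.
theorem pvFinish_zero (bc rc ans profit mx rotation : Int) (hm : profit ≤ mx) :
    pvFinishB bc rc ans profit mx 0 rotation = ans := by
  simp only [pvFinishB]
  have hd0 : PySem.Int.floordiv 0 4 = 0 := by decide
  have hm0 : PySem.Int.mod 0 4 = 0 := by decide
  rw [hd0, hm0]
  simp only [zero_mul, add_zero]
  split_ifs <;> omega

-- Draining phase: once i is past the list, A's per-4 loop equals B's closed form,
-- provided the loop invariants 0 ≤ wait and profit ≤ mx hold and fuel exceeds wait.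
theorem pvDrain (cs : List Int) (bc rc : Int) :
    ∀ (fuel : Nat) (wait ans profit mx rotation : Int) (i : Nat),
      wait.toNat < fuel → cs.length ≤ i → 0 ≤ wait → profit ≤ mx →
      pvLoopA cs bc rc ans profit mx wait rotation i fuel =
        pvFinishB bc rc ans profit mx wait rotation := by
  intro fuel
  induction fuel with
  | zero => intro wait ans profit mx rotation i hn; omega
  | succ n ih =>
    intro wait ans profit mx rotation i hn hi hw hm
    by_cases hwz : wait = 0
    · subst hwz
      rw [pvLoopA, if_neg (by omega : ¬ i < cs.length), if_neg (by simp : ¬ (0 : Int) ≠ 0)]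
      exact (pvFinish_zero bc rc ans profit mx rotation hm).symm
    · rw [pvLoopA, if_neg (by omega : ¬ i < cs.length), if_pos hwz]
      by_cases h4 : wait ≥ 4
      · simp only [if_pos h4]
        rw [← pvFinish_step bc rc ans profit mx wait rotation h4 hm]
        split_ifs with hgt
        · exact ih (wait - 4) _ _ _ _ i (by omega) hi (by omega) le_rfl
        · exact ih (wait - 4) _ _ _ _ i (by omega) hi (by omega) (by omega)
      · simp only [if_neg h4]
        have hlt : wait < 4 := by omega
        have h0 : 0 < wait := by omega
        rw [← pvFinish_small bc rc ans profit mx wait rotation h0 hlt hm]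
        have hww : wait - wait = 0 := by omega
        rw [hww]
        split_ifs with hgt
        · exact ih 0 _ _ _ _ i (by omega) hi le_rfl le_rfl
        · exact ih 0 _ _ _ _ i (by omega) hi le_rfl (by omega)

-- Arrival phase: A's loop from index i is B's fold over the dropped suffix, then the drain.
theorem pvPhase (cs : List Int) (bc rc : Int) :
    ∀ (rest : List Int) (i : Nat) (ans profit mx wait rotation : Int) (fuel : Nat),
      cs.drop i = rest → 0 ≤ wait → profit ≤ mx →
      rest.length + wait.toNat + pvPosSum rest < fuel →
      pvLoopA cs bc rc ans profit mx wait rotation i fuel =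
        (let s := rest.foldl (pvStepB bc rc) (ans, profit, mx, wait, rotation)
         pvFinishB bc rc s.1 s.2.1 s.2.2.1 s.2.2.2.1 s.2.2.2.2) := by
  intro rest
  induction rest with
  | nil =>
    intro i ans profit mx wait rotation fuel hdrop hw hm hfuel
    have hi : cs.length ≤ i := by
      by_contra h
      have := List.drop_eq_nil_iff.mp hdrop
      omega
    simpa using pvDrain cs bc rc fuel wait ans profit mx rotation i (by simp [pvPosSum] at hfuel; omega) hi hw hm
  | cons c rest' ih =>
    intro i ans profit mx wait rotation fuel hdrop hw hm hfuel
    have hi : i < cs.length := by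
      by_contra h
      rw [List.drop_eq_nil_iff.mpr (by omega)] at hdrop
      simp at hdrop
    have hc : cs.getD i 0 = c := by
      have h1 : (cs.drop i).head? = some c := by rw [hdrop]; rfl
      rw [List.head?_drop] at h1
      simp [List.getD, h1]
    have hdrop' : cs.drop (i + 1) = rest' := by
      have h1 := congrArg (List.drop 1) hdrop
      simpa [List.drop_drop, Nat.add_comm] using h1
    obtain ⟨fuel', rfl⟩ : ∃ f, fuel = f + 1 := ⟨fuel - 1, by omega⟩
    have hps : pvPosSum (c :: rest') = c.toNat + pvPosSum rest' := rfl
    rw [pvLoopA]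
    simp only [if_pos hi, hc]
    have hstep : pvStepB bc rc (ans, profit, mx, wait, rotation) c =
        (if profit + (if wait + c ≥ 4 then 4 else wait + c) * bc - rc > mx
           then (rotation + 1, profit + (if wait + c ≥ 4 then 4 else wait + c) * bc - rc,
                 profit + (if wait + c ≥ 4 then 4 else wait + c) * bc - rc,
                 wait + c - (if wait + c ≥ 4 then 4 else wait + c), rotation + 1)
           else (ans, profit + (if wait + c ≥ 4 then 4 else wait + c) * bc - rc, mx,
                 wait + c - (if wait + c ≥ 4 then 4 else wait + c), rotation + 1)) := by
      unfold pvStepB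
      by_cases hlt : wait + c < 4
      · simp only [if_pos hlt, if_neg (by omega : ¬ wait + c ≥ 4)]
      · simp only [if_neg hlt, if_pos (by omega : wait + c ≥ 4)]
    have hfold : ∀ s : Int × Int × Int × Int × Int,
        (c :: rest').foldl (pvStepB bc rc) s = rest'.foldl (pvStepB bc rc) (pvStepB bc rc s c) := by
      intro s; rfl
    rw [hfold, hstep]
    have hcb : c ≤ (c.toNat : Int) := Int.self_le_toNat c
    by_cases h4 : wait + c ≥ 4
    · simp only [if_pos h4]
      have hfu : rest'.length + (wait + c - 4).toNat + pvPosSum rest' < fuel' := by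
        rw [hps] at hfuel; simp only [List.length_cons] at hfuel; omega
      split_ifs with hgt
      · exact ih (i + 1) _ _ _ _ _ fuel' hdrop' (by omega) le_rfl hfu
      · exact ih (i + 1) _ _ _ _ _ fuel' hdrop' (by omega) (by omega) hfu
    · simp only [if_neg h4]
      have hz : wait + c - (wait + c) = 0 := by omega
      rw [hz]
      have hfu : rest'.length + (0 : Int).toNat + pvPosSum rest' < fuel' := by
        rw [hps] at hfuel; simp only [List.length_cons] at hfuel; omega
      split_ifs with hgt
      · exact ih (i + 1) _ _ _ _ _ fuel' hdrop' le_rfl le_rfl hfu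
      · exact ih (i + 1) _ _ _ _ _ fuel' hdrop' le_rfl (by omega) hfu

-- ===== VERDICT (by name: the statement is the Claim_ definition above) =====
theorem minOperationsMaxProfit_spec : Claim_equal_minOperationsMaxProfit := by
  intro cs bc rc _
  unfold Spec_minOperationsMaxProfit minOperationsMaxProfit minOperationsMaxProfit_alt
  exact pvPhase cs bc rc cs 0 (-1) 0 0 0 0 (cs.length + pvPosSum cs + 1) (by simp) le_rfl le_rfl (by simp)
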